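/- GENERATED by mk_final_copies.py from the proof of the farm's unit `start_decoder.R4` (farm:start_decoder.R4.2: Lemmas.lean) as the
   re-elaboration sweep compiled it — do not edit. -/
/-
  LEMMAS of unit `start_decoder.R4` (the logic of the segment; the machine walks are in Proof.lean).

  The interface lemmas that Vorbis/Spec/StartDecoderB.lean (S5) does not have for the residue section — every one of R2 … R7
  needs their like at every call site (S4's half has them: `BookTrans.frame / .grow / .store_young`, `Cur.*`):

      mid_alloc            `Mid` over a change of memory AND a growth of the ghost arena in ONE step (`Mid.frame` asks `ArenaOK` of the
                           SAME ghost arena in the new memory, `Mid.grow` asks the SAME memory: after a successful `setup_malloc`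
                           neither intermediate point exists, the two lemmas do not compose)
      f_where              `*f` does not meet the function's own stack
      resTrans_frame, zero_frame, resCur_frame, resAt_frame     FRAME of `ResTrans`, `ResidueZeroFrom`, `ResCur … 4`, `r(i)`
      InAt, InStep, InAt.step    the assertion at every cut point inside the segment (`BodyR4` with a free pc and a free snapshot `Ai`);
                           what one step keeps; the step lemma
      InStep.of_kept / .of_quiet / .of_alloc / .of_store24        the four kinds of step (a reader call / `error` / a push / a store into
                           `residue_cascade`; `setup_malloc`; the store `r->residue_books = …`)
      InAt.after_reader / .after_stack / .after_error / .alloc_fail / .alloc_ok / .store24    the assertion after each of them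
      InAt.readerPre / .arenaPre / .errorPre / .check_r / .check_cascade                      the callees' preconditions, the check sites
      InAt.toR5 / .toERR     the two exits
      HeadJ, InBody, Alloc, ErrAt     the cut points inside the segment
      cmp_vals, shl4_val, sext_j, inc_j, read_push              bit-level facts of the walk
-/
import Asan.CheckWalk
import Vorbis.Spec.StartDecoderBTest
import Vorbis.Spec.Units.start_decoder_R4

open X86 X86.User Asan Vorbis Vorbis.Spec Vorbis.Spec.StartDecoder

set_option maxRecDepth 4000
set_option maxHeartbeats 4000000

namespace Vorbis.Spec.start_decoder_R4

/-- **`Mid` OVER A CALLEE THAT MAY ALSO GROW THE GHOST ARENA** (`setup_malloc`): `Mid.frame` and `Mid.grow` in one step. The premises are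
those of `Mid.frame` (`he`, `hk`, `hconsts`, `hslot`) and those of `Mid.grow` (`hext`, `henv`, `harena`, `hno`, `hbits`), the last four
for the NEW ghost `A'` in the NEW memory. With `A' = A` it is `Mid.frame`. -/
theorem mid_alloc {g : Ghost} {k kc z : Nat} {Ac : Arena} {A A' : Arena × List Obj} {mem mem' : Mem}
    (h : Mid g k kc z Ac A mem)
    (he : ObjEq (Mid.winsAt k z) mem g.f mem' g.f) (hk : ∀ B, Ac.Blk B → B.Kept mem mem')
    (hconsts : SDFrameConsts kc mem' g.R) (hslot : 6 ≤ k → k ≤ 9 → mem'.i32 (g.R + 0x28) = mem.i32 (g.R + 0x28))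
    (hext : A.1.Extends A'.1) (henv : Env (g.Blk A') (g.Live A') mem') (harena : ArenaOK A'.1 A'.2 mem' g.f)
    (hno : A'.1.temps = []) (hbits : Bits (g.Blk A') g.len mem' g.f) : Mid g k kc z Ac A' mem' := by
  have hge := Mid.hi_ge k
  have m0 : ((0, 8) : Nat × Nat) ∈ Mid.winsAt k z := List.mem_cons_self
  have m1 : ((24, 48) : Nat × Nat) ∈ Mid.winsAt k z := List.mem_cons_of_mem _ List.mem_cons_self
  have m2 : ((152, Mid.hi k) : Nat × Nat) ∈ Mid.winsAt k z :=
    List.mem_cons_of_mem _ (List.mem_cons_of_mem _ List.mem_cons_self)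
  have m3 : ((restFrom z, 1480) : Nat × Nat) ∈ Mid.winsAt k z :=
    List.mem_cons_of_mem _ (List.mem_cons_of_mem _ (List.mem_cons_of_mem _ List.mem_cons_self))
  have m4 : ((1749, 1750) : Nat × Nat) ∈ Mid.winsAt k z :=
    List.mem_cons_of_mem _ (List.mem_cons_of_mem _ (List.mem_cons_of_mem _ (List.mem_cons_of_mem _ List.mem_cons_self)))
  have m5 : ((1784, 1788) : Nat × Nat) ∈ Mid.winsAt k z :=
    List.mem_cons_of_mem _ (List.mem_cons_of_mem _ (List.mem_cons_of_mem _ (List.mem_cons_of_mem _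
      (List.mem_cons_of_mem _ List.mem_cons_self))))
  have hkc : ∀ B, Ac.Blk B → B.Kept mem mem' := hk
  have heown : ObjEq (Own.winsAt k) mem g.f mem' g.f := by
    apply he.sub
    intro w hw
    simp only [Own.winsAt, List.mem_cons, List.mem_nil_iff, or_false] at hw
    rcases hw with rfl | rfl | rfl
    · exact ⟨(0, 8), m0, by simp only []; omega, by simp only []; omega⟩
    · exact ⟨(24, 48), m1, Nat.le_refl _, Nat.le_refl _⟩
    · exact ⟨(152, Mid.hi k), m2, by simp only []; omega, Nat.le_refl _⟩
  have hown := h.own.frame heown hkc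
  refine ⟨henv, ?_, harena, hno, h.extc.trans hext, hbits, ?_, ?_, ?_, hown, ?_, ?_, ?_⟩
  · exact hconsts
  · have e : stb_vorbis.first_decode mem' g.f = stb_vorbis.first_decode mem g.f := by
      simp only [vacc, voff]
      exact he.u8 1749 ⟨(1749, 1750), m4, Nat.le_refl _, Nat.le_refl _⟩
    rw [e]
    exact h.first
  · have e : stb_vorbis.discard_samples_deferred mem' g.f = stb_vorbis.discard_samples_deferred mem g.f := by
      simp only [vacc, voff]
      exact he.i32 1784 ⟨(1784, 1788), m5, Nat.le_refl _, Nat.le_refl _⟩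
    rw [e]
    exact h.discard0
  · apply h.header.transfer
    apply he.sub
    intro w hw
    simp only [HeaderOK.wins, List.mem_cons, List.mem_nil_iff, or_false] at hw
    rcases hw with rfl | rfl
    · exact ⟨(0, 8), m0, Nat.le_refl _, Nat.le_refl _⟩
    · exact ⟨(152, Mid.hi k), m2, Nat.le_refl _, by simp only []; omega⟩
  · -- the slot of longest_floorlist and `values` of every floor
    intro h6 h9
    obtain ⟨h1, h2, h3⟩ := h.lfl h6 h9
    have hb6 := Mid.hi_ge6 h6
    have hfl := h.own.floor h6
    have eslot : mem'.i32 (g.R + 0x28) = mem.i32 (g.R + 0x28) := hslot h6 h9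
    have ecount : stb_vorbis.floor_count mem' g.f = stb_vorbis.floor_count mem g.f := by
      simp only [vacc, voff]
      exact he.i32 176 ⟨(152, Mid.hi k), m2, by simp only []; omega, by simp only []; omega⟩
    have ecfg : stb_vorbis.floor_config mem' g.f = stb_vorbis.floor_config mem g.f := by
      simp only [vacc, voff]
      exact he.u64 312 ⟨(152, Mid.hi k), m2, by simp only []; omega, by simp only []; omega⟩
    have hkept := hkc _ hfl.FL2
    refine ⟨by rw [eslot]; exact h1, by rw [eslot]; exact h2, ?_⟩
    intro i hi
    rw [ecount] at hi
    have eat : stb_vorbis.floor_config_at mem' g.f i = stb_vorbis.floor_config_at mem g.f i := by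
      simp only [stb_vorbis.floor_config_at]
      rw [ecfg]
    have hcnt := hfl.FL1
    have ev : Floor1.values mem' (stb_vorbis.floor_config_at mem g.f i) = Floor1.values mem (stb_vorbis.floor_config_at mem g.f i) := by
      simp only [Floor1.values, stb_vorbis.floor_config_at, voff]
      apply hkept.i32
      · simp only [floorBlock, voff]
        omega
      · simp only [floorBlock, voff]
        omega
    rw [eat, ev, eslot]
    exact h3 i hi
  · intro h9
    have hb9 := Mid.hi_ge9 h9
    apply (h.mode h9).transfer
    apply he.sub
    intro w hw
    simp only [ModeOK.wins, List.mem_cons, List.mem_nil_iff, or_false] at hw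
    rcases hw with rfl | rfl
    · exact ⟨(152, Mid.hi k), m2, by simp only []; omega, by simp only []; omega⟩
    · exact ⟨(152, Mid.hi k), m2, by simp only []; omega, by simp only []; omega⟩
  · -- the zero rest
    intro o ho1 ho2
    have hz := h.rest o ho1 ho2
    simp only [voff] at ho2
    rw [he (restFrom z, 1480) m3 o ho1 ho2]
    exact hz


/-! ### Where `*f` is -/

/-- **`*f` (the stack object `p` of stb_vorbis_open_memory) does not meet start_decoder's own stack** `[RA − 1888, RA + 8)`: it lies
inside ONE live object of the callers' frames (above the return-address slot: `Frame.callers`) or of `A.2` (off the stack). -/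
theorem f_where {u₀ : State} {g : Ghost} {pc : Word} {A : Arena × List Obj} {v : State} (hf : Frame u₀ g pc A v)
    (hh : g.Hand A) :
    g.RA + 8 ≤ g.f ∨ g.f + 1808 ≤ 0x700000 ∨ 0x800000 ≤ g.f := by
  obtain ⟨o, ho, k1, k2⟩ := hh.obj
  simp only [Off.sizeof.stb_vorbis] at k2
  have hra := hf.ra
  rcases List.mem_append.mp ho with hs | hoth
  · left
    unfold stackObjs at hs
    obtain ⟨bF, hbF, hin⟩ := List.mem_flatMap.mp hs
    have hmem : bF ∈ g.frames' := List.mem_cons_of_mem _ hbF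
    obtain ⟨a1, a2, _, _, _⟩ := hf.shadow.stack.active bF hmem
    have hg := FrameLayout.objsAt_gran a1 a2 hin
    have hc := hf.callers bF hbF
    have e : o.gLo = o.base / 8 := rfl
    omega
  · right
    have := hf.shadow.off o hoth
    unfold OffStack at this
    omega

/-! ### FRAME of the residue section's transient -/

/-- The windows of `*f` that RES(i) and the record under construction read: `codebook_count`, `codebooks`; `residue_count`,
`residue_types[]`, `residue_config`. -/
def resWins : Wins := [(160, 176), (320, 464)]

/-- `residue_count` reads the same. -/
theorem count_frame {mem mem' : Mem} {f : Nat} (he : ObjEq resWins mem f mem' f) :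
    stb_vorbis.residue_count mem' f = stb_vorbis.residue_count mem f := by
  simp only [vacc, voff]
  exact he.i32 320 (InWins.of_mem (320, 464) (by decide) (by decide) (by decide))

/-- `residue_config` reads the same. -/
theorem config_frame {mem mem' : Mem} {f : Nat} (he : ObjEq resWins mem f mem' f) :
    stb_vorbis.residue_config mem' f = stb_vorbis.residue_config mem f := by
  simp only [vacc, voff]
  exact he.u64 456 (InWins.of_mem (320, 464) (by decide) (by decide) (by decide))

/-- `r(i) = residue_config + 32·i` does not move. -/
theorem at_frame {mem mem' : Mem} {f : Nat} (he : ObjEq resWins mem f mem' f) (i : Nat) :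
    stb_vorbis.residue_config_at mem' f i = stb_vorbis.residue_config_at mem f i := by
  unfold stb_vorbis.residue_config_at
  rw [config_frame he]

/-- `residue_types[i]` reads the same (`i < 64`). -/
theorem types_frame {mem mem' : Mem} {f : Nat} (he : ObjEq resWins mem f mem' f) (i : Nat) (hi : i < 64) :
    stb_vorbis.residue_types mem' f i = stb_vorbis.residue_types mem f i := by
  simp only [vacc, voff]
  have hw : InWins resWins (324 + 2 * i) 2 := by
    apply InWins.of_mem (320, 464) (by decide)
    · show 320 ≤ 324 + 2 * i
      omega
    · show 324 + 2 * i + 2 ≤ 464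
      omega
  exact he.u16_at (324 + 2 * i) hw (by omega) (by omega)

/-- `codebook_count` reads the same. -/
theorem cbcount_frame {mem mem' : Mem} {f : Nat} (he : ObjEq resWins mem f mem' f) :
    stb_vorbis.codebook_count mem' f = stb_vorbis.codebook_count mem f := by
  simp only [vacc, voff]
  exact he.i32 160 (InWins.of_mem (160, 176) (by decide) (by decide) (by decide))

/-- **FRAME of `ResTrans`** (RES(i) with the ages of its blocks): the windows `resWins` of `*f` read the same, the finished
records (32 bytes each), the codebooks block (the class books' headers) and every block allocated between `A6c` and `Ai` are kept. -/
theorem resTrans_frame {A6 A6c Ai A : Arena} {mem mem' : Mem} {f i : Nat} (h : ResTrans A6 A6c Ai A mem f i)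
    (he : ObjEq resWins mem f mem' f)
    (hrec : ∀ i', i' < i → (Block.mk (stb_vorbis.residue_config_at mem f i') Off.sizeof.Residue).Kept mem mem')
    (hcb : (codebooksBlock mem f).Kept mem mem')
    (hyoung : ∀ B, Since A6c Ai B → B.Kept mem mem') : ResTrans A6 A6c Ai A mem' f i := by
  have ecount := count_frame he
  have econf := config_frame he
  have h1 := h.R1
  have hle := h.n_le
  refine ⟨h.ext6, h.ext6c, h.exti, ?_, ?_, ?_, ?_, ?_⟩
  · rw [ecount]
    exact h.n_le
  · rw [ecount]
    exact h.R1
  · rw [ecount, econf]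
    exact h.R2
  · intro i' hi'
    rw [types_frame he i' (by omega)]
    exact h.R3 i' hi'
  · intro i' hi'
    rw [at_frame he i']
    have hr := h.record i' hi'
    have h7 := hr.R7
    have hcbk : (Block.mk (Residue.cbk mem f (stb_vorbis.residue_config_at mem f i')) 8).Kept mem mem' := by
      apply hcb.mono
      · simp only [vacc, voff]
        omega
      · simp only [vacc, voff] at h7 ⊢
        omega
    have he' : ObjEq ResidueAtOK.wins mem f mem' f := by
      apply he.sub
      intro w hw
      simp only [ResidueAtOK.wins, List.mem_cons, List.mem_nil_iff, or_false] at hw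
      subst hw
      exact ⟨(160, 176), by decide, Nat.le_refl _, Nat.le_refl _⟩
    have hrd := ResidueReads.of_kept he' (hrec i' hi') hcbk
    apply hr.frame hrd
    · intro B hO
      cases hO with
      | books => exact hyoung _ hr.R8
      | classdata => exact hyoung _ hr.R8a
      | row q hq => exact hyoung _ (hr.R8a_row q hq)
    · intro B _ hB
      exact hB

/-- **FRAME of `ResidueZeroFrom`**: the `classdata` field (8 bytes at `r + 16`) of every record reads the same. -/
theorem zero_frame {mem mem' : Mem} {f n : Nat} (h : ResidueZeroFrom mem f n) (he : ObjEq resWins mem f mem' f)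
    (hcd : ∀ i' : Nat, (i' : Int) < stb_vorbis.residue_count mem f →
      (Block.mk (stb_vorbis.residue_config_at mem f i' + 16) 8).Kept mem mem') : ResidueZeroFrom mem' f n := by
  intro i' hn hi'
  rw [count_frame he] at hi'
  rw [at_frame he i']
  have e : Residue.classdata mem' (stb_vorbis.residue_config_at mem f i') =
      Residue.classdata mem (stb_vorbis.residue_config_at mem f i') := by
    simp only [vacc, voff]
    exact (hcd i' hi').u64 _ (Nat.le_refl _) (Nat.le_refl _)
  rw [e]
  exact h i' hn hi'

/-- `r(i)` of the bodies does not move. -/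
theorem resAt_frame {g : Ghost} {mem mem' : Mem} (he : ObjEq resWins mem g.f mem' g.f) (i : Nat) :
    resAt g mem' i = resAt g mem i := by
  unfold resAt
  exact at_frame he i

/-- **FRAME of the record under construction at stage 4** (`ResCur … 4`: R3(i), R4 – R7): the first 16 bytes of the record
(`begin`, `end`, `part_size`, `classifications`, `classbook`) are kept; the block predicates are free (no block clause yet). -/
theorem resCur_frame {g : Ghost} {P Q P' Q' : Block → Prop} {mem mem' : Mem} {i : Nat} (h : ResCur g P Q mem i 4)
    (he : ObjEq resWins mem g.f mem' g.f) (hi : i < 64) (hr : (Block.mk (resAt g mem i) 16).Kept mem mem') :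
    ResCur g P' Q' mem' i 4 := by
  have er := resAt_frame he i
  have e1 : Residue.begin mem' (resAt g mem i) = Residue.begin mem (resAt g mem i) := by
    simp only [vacc, voff]
    exact hr.u32 _ (by simp only []; omega) (by simp only []; omega)
  have e2 : Residue.end_ mem' (resAt g mem i) = Residue.end_ mem (resAt g mem i) := by
    simp only [vacc, voff]
    exact hr.u32 _ (by simp only []; omega) (by simp only []; omega)
  have e3 : Residue.part_size mem' (resAt g mem i) = Residue.part_size mem (resAt g mem i) := by
    simp only [vacc, voff]
    exact hr.u32 _ (by simp only []; omega) (by simp only []; omega)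
  have e4 : Residue.classifications mem' (resAt g mem i) = Residue.classifications mem (resAt g mem i) := by
    simp only [vacc, voff]
    exact hr.u8 _ (by simp only []; omega) (by simp only []; omega)
  have e5 : Residue.classbook mem' (resAt g mem i) = Residue.classbook mem (resAt g mem i) := by
    simp only [vacc, voff]
    exact hr.u8 _ (by simp only []; omega) (by simp only []; omega)
  refine ⟨?_, ?_, ?_, ?_, ?_, ?_, ?_, ?_, ?_⟩
  · rw [count_frame he]
    exact h.lt
  · rw [types_frame he i hi]
    exact h.R3
  · rw [er, e1, e2]
    exact h.R4
  · rw [er, e3]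
    exact h.R5
  · rw [er, e4]
    exact h.R6
  · rw [er, e5, cbcount_frame he]
    exact h.R7
  · intro h5
    omega
  · intro h6
    omega
  · intro h7
    omega

/-! ### The assertion inside the segment, and one step of it -/

/-- **The assertion at every cut point inside segment R4** (`BodyR4` with a free program counter and a free head-of-iteration
snapshot `Ai`: `Ai = A.1` before the allocation of `residue_books`, the arena of before it afterwards). At stage 4 the two block
predicates of `ResCur` are not used. -/
structure InAt (u₀ : State) (g : Ghost) (i : Nat) (A6 A6c Ai : Arena) (A : Arena × List Obj) (pc : Word) (v : State) :
    Prop where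
  loop : ResLoop u₀ g pc i i A6 A6c Ai A v
  rbp : v.reg .rbp = addr g.f
  r14 : v.reg .r14 = addr i
  rbx : v.reg .rbx = addr (resAt g v.mem i)
  cur : ResCur g (Since Ai A.1) (Since Ai A.1) v.mem i 4

/-- The windows of `*f` that no callee of the segment writes (the readers write `[48,56) [84,96) [136,144) [1484,1749)
[1752,1784)`, `setup_malloc` `[8,12) [128,132)`, `error` `[140,144)`). -/
def stepWins : Wins := [(0, 8), (12, 48), (56, 84), (96, 128), (144, 1484), (1749, 1752), (1784, 1808)]

/-- **What one step of the segment (a callee's footprint, a store) keeps**, as the frame lemmas of the assertion's parts ask it. -/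
structure InStep (g : Ghost) (i : Nat) (A6 A6c Ai : Arena) (mem mem' : Mem) : Prop where
  obj : ObjEq stepWins mem g.f mem' g.f
  /-- the blocks of the configuration arena (SD.6's groups) -/
  k6 : ∀ B, A6.Blk B → B.Kept mem mem'
  /-- the blocks of the finished records -/
  kyoung : ∀ B, Since A6c Ai B → B.Kept mem mem'
  /-- the finished records -/
  krec : ∀ i', i' < i → (Block.mk (stb_vorbis.residue_config_at mem g.f i') Off.sizeof.Residue).Kept mem mem'
  /-- `classdata` of every record -/
  kcd : ∀ i' : Nat, (i' : Int) < stb_vorbis.residue_count mem g.f →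
    (Block.mk (stb_vorbis.residue_config_at mem g.f i' + 16) 8).Kept mem mem'
  /-- the first 16 bytes of the record under construction -/
  kcur : (Block.mk (resAt g mem i) 16).Kept mem mem'
  /-- the spill slots `[R + 8, R + 2CH)`: the shadow index, Z10, ONE20, Z24, `longest_floorlist` -/
  low : Mem.EqOn (g.R + 8) (g.R + 0x2c) mem mem'
  /-- the saved registers and the return address -/
  saved : Mem.EqOn (g.R + 0x598) (g.R + 0x5d0) mem mem'
  /-- the global `log2_4` -/
  log2 : Mem.EqOn 0x120640 0x120650 mem mem'
  /-- inside the function's footprint -/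
  foot : Mem.SameExcept (footprint g) mem mem'

/-- **ONE STEP OF THE SEGMENT keeps the assertion** (same ghost arena): the arena layer and `Bits` are given for the new memory
(the callee's post, or `ArenaOK.frame` / `Bits.frame_fields`). -/
theorem InAt.step {u₀ : State} {g : Ghost} {i : Nat} {A6 A6c Ai : Arena} {A : Arena × List Obj} {pc pc' : Word} {v s : State}
    (h : InAt u₀ g i A6 A6c Ai A pc v) (hst : InStep g i A6 A6c Ai v.mem s.mem) (hun : ShadowUntouched v.mem s.mem)
    (harena : ArenaOK A.1 A.2 s.mem g.f) (hbits : Bits (g.Blk A) g.len s.mem g.f)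
    (hrip : s.rip = pc') (hrsp : s.reg .rsp = v.reg .rsp) (hrbp : s.reg .rbp = v.reg .rbp) (hr14 : s.reg .r14 = v.reg .r14)
    (hrbx : s.reg .rbx = v.reg .rbx) (hcode : CodeOK u₀ s.mem) (hinv : abiInv s) : InAt u₀ g i A6 A6c Ai A pc' s := by
  have hf := h.loop.frame
  obtain ⟨hR, hR8⟩ := hf.r_eq
  obtain ⟨_, hra1, hra2⟩ := hf.ra
  simp only [steady, depth] at hR hra1
  have hRlt : g.R + 0x5d0 ≤ 2 ^ 64 := by omega
  have heres : ObjEq resWins v.mem g.f s.mem g.f := hst.obj.sub (by decide)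
  have hemid : ObjEq (Mid.winsAt 6 7) v.mem g.f s.mem g.f := hst.obj.sub (by decide)
  have hR1 := h.loop.res.R1
  have hlt := h.cur.lt
  -- the frame
  have hframe : Frame u₀ g pc' A s := by
    refine ⟨hf.entry, hrip, ?_, ?_, ?_, ?_, ?_, ?_, ?_, ?_, ?_, hcode, hinv, hf.shadow.untouched hun, hf.offText, hf.ext,
      hf.callers, ?_, hf.same.trans hst.foot⟩
    · rw [hrsp]
      exact hf.rsp
    · rw [hst.low.u64 (g.R + 8) (by omega) (by omega) (by omega)]
      exact hf.shadowIdx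
    · rw [hst.saved.u64 (g.R + 0x598) (by omega) (by omega) hRlt]
      exact hf.saved_rbx
    · rw [hst.saved.u64 (g.R + 0x5a0) (by omega) (by omega) hRlt]
      exact hf.saved_rbp
    · rw [hst.saved.u64 (g.R + 0x5a8) (by omega) (by omega) hRlt]
      exact hf.saved_r12
    · rw [hst.saved.u64 (g.R + 0x5b0) (by omega) (by omega) hRlt]
      exact hf.saved_r13
    · rw [hst.saved.u64 (g.R + 0x5b8) (by omega) (by omega) hRlt]
      exact hf.saved_r14
    · rw [hst.saved.u64 (g.R + 0x5c0) (by omega) (by omega) hRlt]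
      exact hf.saved_r15
    · rw [hst.saved.u64 (g.R + 0x5c8) (by omega) (by omega) hRlt]
      exact hf.saved_ra
    · intro k hk
      have e := hf.sh7 k hk
      rw [← e]
      have e2 : (UInt64.ofNat (Vorbis.Globals.log2_4.beg + k)).toNat = 0x120640 + k :=
        toNat_addr (0x120640 + k) (by omega)
      apply hst.log2.readLE
      · rw [e2]
        omega
      · rw [e2]
        omega
      · rw [e2]
        omega
  -- the invariant inside the section
  have hmid : Mid g 6 6 7 A6 A s.mem := by
    apply h.loop.mid.frame hemid hst.k6 ?_ ?_ hun harena hbits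
    · exact h.loop.mid.consts.frame (hst.low.mono (Nat.le_refl _) (by omega)) (by omega)
    · intro _ _
      exact hst.low.i32 (g.R + 0x28) (by omega) (by omega) (by omega)
  -- the codebooks block is a block of the configuration arena
  have hcb : (codebooksBlock v.mem g.f).Kept v.mem s.mem :=
    hst.k6 _ ((h.loop.mid.own.cb0 (by omega)).ok (h.loop.mid.own.nonnull (by omega))).F2
  refine ⟨⟨hframe, h.loop.hand, hmid, ?_, ?_, ?_⟩, ?_, ?_, ?_, ?_⟩
  · rw [count_frame heres]
    exact h.loop.i_le
  · exact resTrans_frame h.loop.res heres hst.krec hcb hst.kyoung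
  · exact zero_frame h.loop.zero heres hst.kcd
  · rw [hrbp]
    exact h.rbp
  · rw [hr14]
    exact h.r14
  · rw [hrbx, resAt_frame heres]
    exact h.rbx
  · exact resCur_frame h.cur heres (by omega) hst.kcur

/-- **A step that keeps every block of the arena** (a callee that writes `*f`, the stack and the shadow only). -/
theorem InStep.of_kept {u₀ : State} {g : Ghost} {i : Nat} {A6 A6c Ai : Arena} {A : Arena × List Obj} {pc : Word} {v : State}
    {mem' : Mem} (h : InAt u₀ g i A6 A6c Ai A pc v) (hobj : ObjEq stepWins v.mem g.f mem' g.f)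
    (hk : AllKept A.1.Blk v.mem mem') (hlow : Mem.EqOn (g.R + 8) (g.R + 0x2c) v.mem mem')
    (hsaved : Mem.EqOn (g.R + 0x598) (g.R + 0x5d0) v.mem mem')
    (hlog2 : Mem.EqOn 0x120640 0x120650 v.mem mem') (hfoot : Mem.SameExcept (footprint g) v.mem mem') :
    InStep g i A6 A6c Ai v.mem mem' := by
  have hres := h.loop.res
  have h1 := hres.R1
  have hle := hres.n_le
  have hlt := h.cur.lt
  have hconf : (Block.mk (stb_vorbis.residue_config v.mem g.f)
      (Off.sizeof.Residue * (stb_vorbis.residue_count v.mem g.f).toNat)).Kept v.mem mem' :=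
    hk _ ((hres.R2.1.mono hres.ext6c).mono hres.exti)
  refine ⟨hobj, ?_, ?_, ?_, ?_, ?_, hlow, hsaved, hlog2, hfoot⟩
  · intro B hB
    exact hk B (hB.mono h.loop.mid.extc)
  · intro B hB
    exact hk B (hB.1.mono hres.exti)
  · intro i' hi'
    apply hconf.mono
    · simp only [vacc, voff]
      omega
    · simp only [vacc, voff] at h1 hle ⊢
      omega
  · intro i' hi'
    apply hconf.mono
    · simp only [vacc, voff]
      omega
    · simp only [vacc, voff] at h1 hi' ⊢
      omega
  · apply hconf.mono
    · simp only [resAt, vacc, voff]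
      omega
    · simp only [resAt, vacc, voff] at h1 hlt ⊢
      omega

/-- **A window of a quiet step**: the stack below the steady stack pointer (a callee's frame, a pushed return address), the frame
object `residue_cascade` (`[R + C0H, R + 100H)`), or one of the bit reader's windows of `*f`. -/
def Quiet (g : Ghost) (w : Span) : Prop :=
  (g.RA - 1888 ≤ w.lo ∧ w.hi ≤ g.R) ∨ (g.R + 0xc0 ≤ w.lo ∧ w.hi ≤ g.R + 0x100) ∨
  (g.f + 48 ≤ w.lo ∧ w.hi ≤ g.f + 56) ∨ (g.f + 84 ≤ w.lo ∧ w.hi ≤ g.f + 96) ∨ (g.f + 136 ≤ w.lo ∧ w.hi ≤ g.f + 144) ∨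
  (g.f + 1484 ≤ w.lo ∧ w.hi ≤ g.f + 1749) ∨ (g.f + 1752 ≤ w.lo ∧ w.hi ≤ g.f + 1784)

/-- **A quiet step** (a reader call, `error`, a store into `residue_cascade`, a push): every window is `Quiet`. -/
theorem InStep.of_quiet {u₀ : State} {g : Ghost} {i : Nat} {A6 A6c Ai : Arena} {A : Arena × List Obj} {pc : Word} {v : State}
    {mem' : Mem} (h : InAt u₀ g i A6 A6c Ai A pc v) {ws : List Span} (hs : Mem.SameExcept ws v.mem mem')
    (hq : ∀ w, w ∈ ws → Quiet g w) : InStep g i A6 A6c Ai v.mem mem' := by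
  have hf := h.loop.frame
  obtain ⟨hR, hR8⟩ := hf.r_eq
  obtain ⟨_, hra1, hra2⟩ := hf.ra
  simp only [steady, depth] at hR hra1
  have hfw := f_where hf h.loop.hand
  have hobr := h.loop.mid.bits.OBR
  simp only [Off.sizeof.stb_vorbis] at hobr
  have harena := h.loop.mid.arena
  have hout := h.loop.hand.objOut
  simp only [Off.sizeof.stb_vorbis] at hout
  apply InStep.of_kept h
  · apply ObjEq.of_sameExcept hs
    · intro w hw
      simp only [stepWins, List.mem_cons, List.mem_nil_iff, or_false] at hw
      rcases hw with rfl | rfl | rfl | rfl | rfl | rfl | rfl <;> simp only [] <;> omega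
    · intro w hw s hs'
      have hqs := hq s hs'
      unfold Quiet at hqs
      simp only [stepWins, List.mem_cons, List.mem_nil_iff, or_false] at hw
      rcases hw with rfl | rfl | rfl | rfl | rfl | rfl | rfl <;> simp only [] <;> omega
  · apply AllKept.of_sameExcept harena.blkOK hs
    intro B hB w hw
    have hqs := hq w hw
    unfold Quiet at hqs
    have h1 := harena.blk_off_stack hB
    have h2 := arena_inside harena hB
    omega
  · apply hs.eqOn
    intro w hw
    have hqs := hq w hw
    unfold Quiet at hqs
    omega
  · apply hs.eqOn
    intro w hw
    have hqs := hq w hw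
    unfold Quiet at hqs
    omega
  · apply hs.eqOn
    intro w hw
    have hqs := hq w hw
    unfold Quiet at hqs
    omega
  · apply hs.mono
    intro w hw a ha1 ha2
    have hqs := hq w hw
    unfold Quiet at hqs
    by_cases hst : a < g.RA ∧ g.RA - 1888 ≤ a
    · refine ⟨⟨g.RA - depth, g.RA⟩, List.mem_cons_self, ?_, ?_⟩
      · simp only [depth]
        omega
      · simp only []
        omega
    · refine ⟨(objBlock (g.e.reg .rdi).toNat).span, List.mem_cons_of_mem _ List.mem_cons_self, ?_, ?_⟩
      · show g.f ≤ a
        omega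
      · show a < g.f + 1808
        omega

/-- A quiet step writes no shadow byte. -/
theorem quiet_untouched {u₀ : State} {g : Ghost} {i : Nat} {A6 A6c Ai : Arena} {A : Arena × List Obj} {pc : Word} {v : State}
    {mem' : Mem} (h : InAt u₀ g i A6 A6c Ai A pc v) {ws : List Span} (hs : Mem.SameExcept ws v.mem mem')
    (hq : ∀ w, w ∈ ws → Quiet g w) : ShadowUntouched v.mem mem' := by
  have hf := h.loop.frame
  obtain ⟨hR, hR8⟩ := hf.r_eq
  obtain ⟨_, hra1, hra2⟩ := hf.ra
  simp only [steady, depth] at hR hra1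
  have hobr := h.loop.mid.bits.OBR
  simp only [Off.sizeof.stb_vorbis] at hobr
  apply hs.eqOn
  intro w hw
  have hqs := hq w hw
  unfold Quiet at hqs
  omega

/-- **Going on without a store**: the memory is the same, the program counter and the scratch registers moved. -/
theorem InAt.move {u₀ : State} {g : Ghost} {i : Nat} {A6 A6c Ai : Arena} {A : Arena × List Obj} {pc pc' : Word} {v s : State}
    (h : InAt u₀ g i A6 A6c Ai A pc v) (hmem : s.mem = v.mem)
    (hrip : s.rip = pc') (hrsp : s.reg .rsp = v.reg .rsp) (hrbp : s.reg .rbp = v.reg .rbp) (hr14 : s.reg .r14 = v.reg .r14)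
    (hrbx : s.reg .rbx = v.reg .rbx) (hinv : abiInv s) : InAt u₀ g i A6 A6c Ai A pc' s := by
  have hs : Mem.SameExcept [] v.mem s.mem := by
    rw [hmem]
    exact Mem.SameExcept.refl _ _
  have hq : ∀ w, w ∈ ([] : List Span) → Quiet g w := by
    intro w hw
    cases hw
  apply h.step (InStep.of_quiet h hs hq) (quiet_untouched h hs hq) ?_ ?_ hrip hrsp hrbp hr14 hrbx ?_ hinv
  · rw [hmem]
    exact h.loop.mid.arena
  · rw [hmem]
    exact h.loop.mid.bits
  · rw [hmem]
    exact h.loop.frame.code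

/-- The steady stack pointer in the walker's form, and as a number. -/
theorem rsp_eq {u₀ : State} {g : Ghost} {pc : Word} {A : Arena × List Obj} {v : State} (h : Frame u₀ g pc A v) :
    v.reg .rsp = g.e.reg .rsp - 1480 ∧ g.R + 1480 = (g.e.reg .rsp).toNat := by
  have h1 := h.r_eq.1
  have h2 := h.ra
  simp only [steady, depth, Ghost.RA] at h1 h2
  refine ⟨?_, h1⟩
  rw [h.rsp]
  unfold addr
  u_omega

/-! ### `Bits` and the arena layer over the segment's own stores; the callees' preconditions -/

/-- **A window that `Bits` does not read**: the own stack, `residue_cascade`, `setup_memory_required`, `setup_offset` … `error`,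
the shadow. -/
def BitsQuiet (g : Ghost) (w : Span) : Prop :=
  (g.RA - 1888 ≤ w.lo ∧ w.hi ≤ g.R) ∨ (g.R + 0xc0 ≤ w.lo ∧ w.hi ≤ g.R + 0x100) ∨
  (g.f + 8 ≤ w.lo ∧ w.hi ≤ g.f + 12) ∨ (g.f + 128 ≤ w.lo ∧ w.hi ≤ g.f + 144) ∨ 0xC00000 ≤ w.lo

/-- `Bits` over stores that miss the fields it reads. -/
theorem InAt.bits_frame {u₀ : State} {g : Ghost} {i : Nat} {A6 A6c Ai : Arena} {A : Arena × List Obj} {pc : Word} {v : State}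
    {mem' : Mem} (h : InAt u₀ g i A6 A6c Ai A pc v) {ws : List Span} (hs : Mem.SameExcept ws v.mem mem')
    (hq : ∀ w, w ∈ ws → BitsQuiet g w) : Bits (g.Blk A) g.len mem' g.f := by
  have hf := h.loop.frame
  obtain ⟨hR, hR8⟩ := hf.r_eq
  obtain ⟨_, hra1, hra2⟩ := hf.ra
  simp only [steady, depth] at hR hra1
  have hfw := f_where hf h.loop.hand
  have hobr := h.loop.mid.bits.OBR
  simp only [Off.sizeof.stb_vorbis] at hobr
  apply h.loop.mid.bits.frame_fields
  constructor
  · apply hs.eqOn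
    intro w hw
    have hqs := hq w hw
    unfold BitsQuiet at hqs
    omega
  · apply hs.eqOn
    intro w hw
    have hqs := hq w hw
    unfold BitsQuiet at hqs
    omega
  · apply hs.eqOn
    intro w hw
    have hqs := hq w hw
    unfold BitsQuiet at hqs
    omega
  · apply hs.eqOn
    intro w hw
    have hqs := hq w hw
    unfold BitsQuiet at hqs
    omega

/-- The arena layer over a quiet step (AR5 reads `[f + 112, f + 136)`). -/
theorem InAt.arena_frame {u₀ : State} {g : Ghost} {i : Nat} {A6 A6c Ai : Arena} {A : Arena × List Obj} {pc : Word} {v : State}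
    {mem' : Mem} (h : InAt u₀ g i A6 A6c Ai A pc v) {ws : List Span} (hs : Mem.SameExcept ws v.mem mem')
    (hq : ∀ w, w ∈ ws → Quiet g w) : ArenaOK A.1 A.2 mem' g.f := by
  have hf := h.loop.frame
  obtain ⟨hR, hR8⟩ := hf.r_eq
  obtain ⟨_, hra1, hra2⟩ := hf.ra
  simp only [steady, depth] at hR hra1
  have hfw := f_where hf h.loop.hand
  have hobr := h.loop.mid.bits.OBR
  simp only [Off.sizeof.stb_vorbis] at hobr
  apply h.loop.mid.arena.frame
  · simp only [Off.sizeof.stb_vorbis]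
    omega
  · apply hs.eqOn
    intro w hw
    have hqs := hq w hw
    unfold Quiet at hqs
    simp only [voff]
    omega

/-- **The shadow clause of a callee's precondition** at the state `s` right after a `call` from a cut point of the segment: the
only store since the cut is the pushed return address. -/
theorem InAt.shadowPre {u₀ : State} {g : Ghost} {i : Nat} {A6 A6c Ai : Arena} {A : Arena × List Obj} {pc : Word} {v s : State}
    (h : InAt u₀ g i A6 A6c Ai A pc v) (hun : ShadowUntouched v.mem s.mem) (hrsp : (s.reg .rsp).toNat + 8 = g.R) :
    ShadowPre A.2 g.frames' s :=
  shadowPre_call h.loop.frame hrsp hun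

/-- **`ReaderPre` of `get_bits(f, n)`** at a call from a cut point of the segment. -/
theorem InAt.readerPre {u₀ : State} {g : Ghost} {i : Nat} {A6 A6c Ai : Arena} {A : Arena × List Obj} {pc : Word} {v s : State}
    (h : InAt u₀ g i A6 A6c Ai A pc v) (hun : ShadowUntouched v.mem s.mem) (hrsp : (s.reg .rsp).toNat + 8 = g.R)
    (hrdi : (s.reg .rdi).toNat = g.f) (hbits : Bits (g.Blk A) g.len s.mem g.f) :
    ReaderPre A.2 g.frames' (g.Blk A) g.len s := by
  refine ⟨h.shadowPre hun hrsp, ?_, ?_⟩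
  · rw [hrdi]
    exact readerEnv_mid h.loop.hand h.loop.mid
  · rw [hrdi]
    exact hbits

/-- **`ArenaPre` of `setup_malloc(f, sz)`** at a call from a cut point of the segment. -/
theorem InAt.arenaPre {u₀ : State} {g : Ghost} {i : Nat} {A6 A6c Ai : Arena} {A : Arena × List Obj} {pc : Word} {v s : State}
    (h : InAt u₀ g i A6 A6c Ai A pc v) (hun : ShadowUntouched v.mem s.mem) (hrsp : (s.reg .rsp).toNat + 8 = g.R)
    (hrdi : (s.reg .rdi).toNat = g.f) (harena : ArenaOK A.1 A.2 s.mem g.f) : ArenaPre A.1 A.2 g.frames' s := by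
  refine ⟨h.shadowPre hun hrsp, ?_, ?_, h.loop.hand.arenaText⟩
  · rw [hrdi]
    exact (h.loop.hand.obj.mono (frames'_sub g A.2)).blockLive
  · rw [hrdi]
    exact harena

/-- **`error.spec`'s precondition** at a call from a cut point of the segment. -/
theorem InAt.errorPre {u₀ : State} {g : Ghost} {i : Nat} {A6 A6c Ai : Arena} {A : Arena × List Obj} {pc : Word} {v s : State}
    (h : InAt u₀ g i A6 A6c Ai A pc v) (hun : ShadowUntouched v.mem s.mem) (hrsp : (s.reg .rsp).toNat + 8 = g.R)
    (hrdi : (s.reg .rdi).toNat = g.f) : (error.spec A.2 g.frames').pre s := by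
  refine ⟨h.shadowPre hun hrsp, ?_⟩
  rw [hrdi]
  exact h.loop.hand.obj.mono (frames'_sub g A.2)

/-! ### The record under construction: where it is, its check sites -/

/-- The block `residue_config` is a block of the current arena, and record `i` lies inside it. -/
theorem InAt.record_in {u₀ : State} {g : Ghost} {i : Nat} {A6 A6c Ai : Arena} {A : Arena × List Obj} {pc : Word} {v : State}
    (h : InAt u₀ g i A6 A6c Ai A pc v) :
    A.1.Blk ⟨stb_vorbis.residue_config v.mem g.f, Off.sizeof.Residue * (stb_vorbis.residue_count v.mem g.f).toNat⟩ ∧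
      stb_vorbis.residue_config v.mem g.f ≤ resAt g v.mem i ∧
      resAt g v.mem i + 32 ≤ stb_vorbis.residue_config v.mem g.f +
        Off.sizeof.Residue * (stb_vorbis.residue_count v.mem g.f).toNat := by
  have hres := h.loop.res
  have h1 := hres.R1
  have hlt := h.cur.lt
  refine ⟨(hres.R2.1.mono hres.ext6c).mono hres.exti, ?_, ?_⟩
  · simp only [resAt, vacc, voff]
    omega
  · simp only [resAt, vacc, voff] at h1 hlt ⊢
    omega

/-- **Where record `i` is**, as one arithmetic fact for the walker: above the text, in the data space, off the stack. -/
theorem InAt.where_r {u₀ : State} {g : Ghost} {i : Nat} {A6 A6c Ai : Arena} {A : Arena × List Obj} {pc : Word} {v : State}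
    (h : InAt u₀ g i A6 A6c Ai A pc v) :
    0x119d40 ≤ resAt g v.mem i ∧ resAt g v.mem i + 32 ≤ 0xC00000 ∧
      (resAt g v.mem i + 32 ≤ 0x700000 ∨ 0x800000 ≤ resAt g v.mem i) := by
  obtain ⟨hB, h1, h2⟩ := h.record_in
  have harena := h.loop.mid.arena
  have hoff := harena.blk_off_stack hB
  have hin := arena_inside harena hB
  have hb := harena.bounds
  have ht := h.loop.hand.arenaText
  have e : L.textHi = 0x119d40 := rfl
  simp only [] at hoff hin
  omega

/-- **A check site inside record `i`** (`r + 12` load1, `r + 24` store8): the record lies inside the live block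
`residue_config`. -/
theorem InAt.check_r {u₀ : State} {g : Ghost} {i : Nat} {A6 A6c Ai : Arena} {A : Arena × List Obj} {pc : Word} {v : State}
    (h : InAt u₀ g i A6 A6c Ai A pc v) {mem' : Mem} (hun : ShadowUntouched v.mem mem') (b : Word) (off k : Nat)
    (hb : b.toNat = resAt g v.mem i + off) (hk : 1 ≤ k) (hoff : off + k ≤ 32) : AccSmall k mem' b := by
  obtain ⟨hB, h1, h2⟩ := h.record_in
  have hl : LiveIn A.2 g.frames' _ _ := liveIn_of_arenaBlk h.loop.mid.arena hB
  apply hl.accSmall h.loop.frame.shadow hun b k hk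
  · simp only []
    omega
  · simp only []
    omega

/-! ### The cut points inside the segment -/

/-- The loop head with the counter `j` named. -/
def HeadJ (u₀ : State) (g : Ghost) (i j : Nat) (v : State) : Prop :=
  ∃ (A6 A6c : Arena) (A : Arena × List Obj),
    InAt u₀ g i A6 A6c A.1 A Vorbis.L.start_decoder.loop28 v ∧ v.reg .r13 = addr j ∧ j ≤ 64

/-- **Inside the body of loop 4055**, at the cut point `pc` (after a `get_bits` returned): `r13d = j`, `j < classifications ≤ 64`. -/
def InBody (u₀ : State) (g : Ghost) (i : Nat) (pc : Word) (j : Nat) (v : State) : Prop :=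
  ∃ (A6 A6c : Arena) (A : Arena × List Obj), InAt u₀ g i A6 A6c A.1 A pc v ∧ v.reg .r13 = addr j ∧ j < 64

/-- **After `setup_malloc(f, 16·cls)` returned** (0x115ba2): it failed (rax = 0, the ghost arena is the old one), or rax is a
block of `16·cls` bytes allocated since `Ai`, the arena of before the call. -/
def Alloc (u₀ : State) (g : Ghost) (i : Nat) (v : State) : Prop :=
  ∃ (A6 A6c Ai : Arena) (A : Arena × List Obj), InAt u₀ g i A6 A6c Ai A Vorbis.L.start_decoder.cut252 v ∧
    (v.reg .rax = 0 ∨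
      (v.reg .rax ≠ 0 ∧
        Since Ai A.1 ⟨(v.reg .rax).toNat, 16 * Residue.classifications v.mem (resAt g v.mem i)⟩))

/-- **After `error(f, VORBIS_outofmem)` returned** (0x115bc8): eax = 0; `residue_books` of record `i` is NULL. -/
def ErrAt (u₀ : State) (g : Ghost) (i : Nat) (v : State) : Prop :=
  ∃ (A6 A6c Ai : Arena) (A : Arena × List Obj), InAt u₀ g i A6 A6c Ai A Vorbis.L.start_decoder.cut253 v ∧
    (v.reg .rax).toNat % 2 ^ 32 = 0

/-! ### The assertion after a callee returned -/

/-- **After `get_bits(f, n)` returned** (also: after `error` returned, whose window `[f + 140, f + 144)` lies inside the third):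
the footprint since the cut point is the stack below the steady stack pointer and the bit reader's windows; `Bits` is the
callee's post. -/
theorem InAt.after_reader {u₀ : State} {g : Ghost} {i : Nat} {A6 A6c Ai : Arena} {A : Arena × List Obj} {pc pc' : Word}
    {v s : State} (h : InAt u₀ g i A6 A6c Ai A pc v)
    (hsame : Mem.SameExcept
      [⟨(g.e.reg .rsp).toNat - 1888, (g.e.reg .rsp).toNat - 1480⟩,
       ⟨g.f + 48, g.f + 56⟩, ⟨g.f + 84, g.f + 96⟩, ⟨g.f + 136, g.f + 144⟩, ⟨g.f + 1484, g.f + 1749⟩,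
       ⟨g.f + 1752, g.f + 1784⟩] v.mem s.mem)
    (hbits : Bits (g.Blk A) g.len s.mem g.f)
    (hrip : s.rip = pc') (hrsp : s.reg .rsp = v.reg .rsp) (hrbp : s.reg .rbp = v.reg .rbp) (hr14 : s.reg .r14 = v.reg .r14)
    (hrbx : s.reg .rbx = v.reg .rbx) (hcode : CodeOK u₀ s.mem) (hinv : abiInv s) : InAt u₀ g i A6 A6c Ai A pc' s := by
  have hf := h.loop.frame
  obtain ⟨hR, hR8⟩ := hf.r_eq
  simp only [steady] at hR
  have eRA : g.RA = (g.e.reg .rsp).toNat := rfl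
  have hq : ∀ w, w ∈ [(⟨(g.e.reg .rsp).toNat - 1888, (g.e.reg .rsp).toNat - 1480⟩ : Span),
       ⟨g.f + 48, g.f + 56⟩, ⟨g.f + 84, g.f + 96⟩, ⟨g.f + 136, g.f + 144⟩, ⟨g.f + 1484, g.f + 1749⟩,
       ⟨g.f + 1752, g.f + 1784⟩] → Quiet g w := by
    intro w hw
    unfold Quiet
    simp only [List.mem_cons, List.mem_nil_iff, or_false] at hw
    rcases hw with rfl | rfl | rfl | rfl | rfl | rfl <;> simp only [] <;> omega
  exact h.step (InStep.of_quiet h hsame hq) (quiet_untouched h hsame hq) (h.arena_frame hsame hq) hbits hrip hrsp hrbp hr14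
    hrbx hcode hinv

/-- **After a store of the segment into its own stack** (a pushed return address, the byte of `residue_cascade`). -/
theorem InAt.after_stack {u₀ : State} {g : Ghost} {i : Nat} {A6 A6c Ai : Arena} {A : Arena × List Obj} {pc pc' : Word}
    {v s : State} (h : InAt u₀ g i A6 A6c Ai A pc v)
    (hsame : Mem.SameExcept
      [⟨(g.e.reg .rsp).toNat - 1888, (g.e.reg .rsp).toNat - 1480⟩,
       ⟨(g.e.reg .rsp).toNat - 1288, (g.e.reg .rsp).toNat - 1224⟩] v.mem s.mem)
    (hrip : s.rip = pc') (hrsp : s.reg .rsp = v.reg .rsp) (hrbp : s.reg .rbp = v.reg .rbp) (hr14 : s.reg .r14 = v.reg .r14)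
    (hrbx : s.reg .rbx = v.reg .rbx) (hcode : CodeOK u₀ s.mem) (hinv : abiInv s) : InAt u₀ g i A6 A6c Ai A pc' s := by
  have hf := h.loop.frame
  obtain ⟨hR, hR8⟩ := hf.r_eq
  simp only [steady] at hR
  have eRA : g.RA = (g.e.reg .rsp).toNat := rfl
  obtain ⟨_, hra1, hra2⟩ := hf.ra
  simp only [depth] at hra1
  have hq : ∀ w, w ∈ [(⟨(g.e.reg .rsp).toNat - 1888, (g.e.reg .rsp).toNat - 1480⟩ : Span),
       ⟨(g.e.reg .rsp).toNat - 1288, (g.e.reg .rsp).toNat - 1224⟩] → Quiet g w := by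
    intro w hw
    unfold Quiet
    simp only [List.mem_cons, List.mem_nil_iff, or_false] at hw
    rcases hw with rfl | rfl <;> simp only [] <;> omega
  have hq' : ∀ w, w ∈ [(⟨(g.e.reg .rsp).toNat - 1888, (g.e.reg .rsp).toNat - 1480⟩ : Span),
       ⟨(g.e.reg .rsp).toNat - 1288, (g.e.reg .rsp).toNat - 1224⟩] → BitsQuiet g w := by
    intro w hw
    unfold BitsQuiet
    simp only [List.mem_cons, List.mem_nil_iff, or_false] at hw
    rcases hw with rfl | rfl <;> simp only [] <;> omega
  exact h.step (InStep.of_quiet h hsame hq) (quiet_untouched h hsame hq) (h.arena_frame hsame hq) (h.bits_frame hsame hq')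
    hrip hrsp hrbp hr14 hrbx hcode hinv

/-- `Bits` at a callee's entry: the only store since the cut point is the pushed return address. -/
theorem InAt.bits_call {u₀ : State} {g : Ghost} {i : Nat} {A6 A6c Ai : Arena} {A : Arena × List Obj} {pc : Word}
    {v : State} {mem' : Mem} (h : InAt u₀ g i A6 A6c Ai A pc v)
    (hsame : Mem.SameExcept [⟨(g.e.reg .rsp).toNat - 1888, (g.e.reg .rsp).toNat - 1480⟩] v.mem mem') :
    Bits (g.Blk A) g.len mem' g.f ∧ ArenaOK A.1 A.2 mem' g.f := by
  have hf := h.loop.frame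
  obtain ⟨hR, hR8⟩ := hf.r_eq
  simp only [steady] at hR
  have eRA : g.RA = (g.e.reg .rsp).toNat := rfl
  constructor
  · apply h.bits_frame hsame
    intro w hw
    unfold BitsQuiet
    simp only [List.mem_cons, List.mem_nil_iff, or_false] at hw
    subst hw
    simp only []
    omega
  · apply h.arena_frame hsame
    intro w hw
    unfold Quiet
    simp only [List.mem_cons, List.mem_nil_iff, or_false] at hw
    subst hw
    simp only []
    omega

/-! ### Over `setup_malloc(f, n)`, `n ≤ 1024` -/

/-- **The step over `setup_malloc(f, n)`** (either outcome): its footprint is the stack below the steady stack pointer,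
`setup_memory_required`, `setup_offset`, and the shadow of the would-be block — all off `*f`'s other fields, off every block of the
arena, off the spill slots. `hcase`: the request fits (then the block lies inside the arena, its shadow inside the function's
footprint), or no shadow byte was written. -/
theorem InStep.of_alloc {u₀ : State} {g : Ghost} {i : Nat} {A6 A6c Ai : Arena} {A : Arena × List Obj} {pc : Word} {v : State}
    {mem' : Mem} (h : InAt u₀ g i A6 A6c Ai A pc v) (n : Nat) (hn : n ≤ 1024)
    (hs : Mem.SameExcept
      [⟨(g.e.reg .rsp).toNat - 1888, (g.e.reg .rsp).toNat - 1480⟩, ⟨g.f + 8, g.f + 12⟩, ⟨g.f + 128, g.f + 132⟩,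
       shadowSpan (A.1.B + A.1.S + 32) (A.1.B + A.1.S + 32 + n)] v.mem mem')
    (hcase : A.1.Fits n ∨ ShadowUntouched v.mem mem') : InStep g i A6 A6c Ai v.mem mem' := by
  have hf := h.loop.frame
  obtain ⟨hR, hR8⟩ := hf.r_eq
  obtain ⟨_, hra1, hra2⟩ := hf.ra
  simp only [steady, depth] at hR hra1
  have eRA : g.RA = (g.e.reg .rsp).toNat := rfl
  have hfw := f_where hf h.loop.hand
  have hobr := h.loop.mid.bits.OBR
  simp only [Off.sizeof.stb_vorbis] at hobr
  have harena := h.loop.mid.arena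
  have hout := h.loop.hand.objOut
  simp only [Off.sizeof.stb_vorbis] at hout
  have hb := harena.bounds
  have hmem : ∀ w, w ∈ [(⟨(g.e.reg .rsp).toNat - 1888, (g.e.reg .rsp).toNat - 1480⟩ : Span), ⟨g.f + 8, g.f + 12⟩,
      ⟨g.f + 128, g.f + 132⟩, shadowSpan (A.1.B + A.1.S + 32) (A.1.B + A.1.S + 32 + n)] →
      (g.RA - 1888 ≤ w.lo ∧ w.hi ≤ g.R) ∨ (g.f + 8 ≤ w.lo ∧ w.hi ≤ g.f + 12) ∨ (g.f + 128 ≤ w.lo ∧ w.hi ≤ g.f + 132) ∨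
        (0xC00000 ≤ w.lo ∧ w.hi ≤ 0xE00000) := by
    intro w hw
    simp only [List.mem_cons, List.mem_nil_iff, or_false] at hw
    rcases hw with rfl | rfl | rfl | rfl
    · left
      simp only []
      omega
    · right; left
      simp only []
      omega
    · right; right; left
      simp only []
      omega
    · right; right; right
      simp only [shadowSpan]
      omega
  apply InStep.of_kept h
  · apply ObjEq.of_sameExcept hs
    · intro w hw
      simp only [stepWins, List.mem_cons, List.mem_nil_iff, or_false] at hw
      rcases hw with rfl | rfl | rfl | rfl | rfl | rfl | rfl <;> simp only [] <;> omega
    · intro w hw s hs'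
      have hqs := hmem s hs'
      simp only [stepWins, List.mem_cons, List.mem_nil_iff, or_false] at hw
      rcases hw with rfl | rfl | rfl | rfl | rfl | rfl | rfl <;> simp only [] <;> omega
  · apply AllKept.of_sameExcept harena.blkOK hs
    intro B hB w hw
    have hqs := hmem w hw
    have h1 := harena.blk_off_stack hB
    have h2 := arena_inside harena hB
    omega
  · apply hs.eqOn
    intro w hw
    have hqs := hmem w hw
    omega
  · apply hs.eqOn
    intro w hw
    have hqs := hmem w hw
    omega
  · apply hs.eqOn
    intro w hw
    have hqs := hmem w hw
    omega
  · -- inside the function's footprint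
    have eB : g.A0.1.B = A.1.B := hf.ext.B.symm
    have eL : g.A0.1.L = A.1.L := hf.ext.L.symm
    intro a ha
    have hstack := ha ⟨g.RA - depth, g.RA⟩ List.mem_cons_self
    have hobj := ha (objBlock (g.e.reg .rdi).toNat).span (List.mem_cons_of_mem _ List.mem_cons_self)
    have hshw := ha (shadowSpan g.A0.1.B (g.A0.1.B + g.A0.1.L))
      (List.mem_cons_of_mem _ (List.mem_cons_of_mem _ (List.mem_cons_of_mem _ (List.mem_cons_of_mem _ List.mem_cons_self))))
    have hobj' : a.toNat < g.f ∨ g.f + 1808 ≤ a.toNat := hobj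
    simp only [depth] at hstack
    simp only [shadowSpan] at hshw
    rw [eB, eL] at hshw
    rcases hcase with hfit | hun
    · apply hs
      intro w hw
      simp only [List.mem_cons, List.mem_nil_iff, or_false] at hw
      unfold Arena.Fits at hfit
      have hl := le_r8 n
      rcases hw with rfl | rfl | rfl | rfl
      · simp only []
        omega
      · simp only []
        omega
      · simp only []
        omega
      · simp only [shadowSpan]
        omega
    · by_cases hin : 0xC00000 ≤ a.toNat ∧ a.toNat < 0xE00000
      · exact hun a hin.1 hin.2
      · apply hs
        intro w hw
        have hqs := hmem w hw
        omega

/-- **After `setup_malloc` FAILED**: the ghost arena and the shadow are as they were (the callee's post). -/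
theorem InAt.alloc_fail {u₀ : State} {g : Ghost} {i : Nat} {A6 A6c Ai : Arena} {A : Arena × List Obj} {pc pc' : Word}
    {v s : State} (h : InAt u₀ g i A6 A6c Ai A pc v) (n : Nat) (hn : n ≤ 1024)
    (hs : Mem.SameExcept
      [⟨(g.e.reg .rsp).toNat - 1888, (g.e.reg .rsp).toNat - 1480⟩, ⟨g.f + 8, g.f + 12⟩, ⟨g.f + 128, g.f + 132⟩,
       shadowSpan (A.1.B + A.1.S + 32) (A.1.B + A.1.S + 32 + n)] v.mem s.mem)
    (hun : ShadowUntouched v.mem s.mem) (harena : ArenaOK A.1 A.2 s.mem g.f)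
    (hrip : s.rip = pc') (hrsp : s.reg .rsp = v.reg .rsp) (hrbp : s.reg .rbp = v.reg .rbp) (hr14 : s.reg .r14 = v.reg .r14)
    (hrbx : s.reg .rbx = v.reg .rbx) (hcode : CodeOK u₀ s.mem) (hinv : abiInv s) : InAt u₀ g i A6 A6c Ai A pc' s := by
  have hf := h.loop.frame
  obtain ⟨hR, hR8⟩ := hf.r_eq
  simp only [steady] at hR
  have eRA : g.RA = (g.e.reg .rsp).toNat := rfl
  have hbits : Bits (g.Blk A) g.len s.mem g.f := by
    apply h.bits_frame hs
    intro w hw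
    unfold BitsQuiet
    simp only [List.mem_cons, List.mem_nil_iff, or_false] at hw
    rcases hw with rfl | rfl | rfl | rfl
    · left
      simp only []
      omega
    · right; right; left
      simp only []
      omega
    · right; right; right; left
      simp only []
      omega
    · right; right; right; right
      simp only [shadowSpan]
      omega
  exact h.step (InStep.of_alloc h n hn hs (Or.inr hun)) hun harena hbits hrip hrsp hrbp hr14 hrbx hcode hinv

/-- The live set grows with the object list. -/
theorem liveSet_mono {objs objs' : List Obj} (hsub : ∀ o, o ∈ objs → o ∈ objs') (x : Nat) (h : Asan.Live objs x) :
    Asan.Live objs' x := by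
  obtain ⟨o, ho, hb⟩ := h
  exact ⟨o, hsub o ho, hb⟩

/-- **After `setup_malloc(f, n)` SUCCEEDED** (`n ≤ 1024`): the ghost arena grew to `A.1.pushSetup n`, the new block is one more
live object; the assertion holds for the new ghost, with the arena of before the call as the head-of-iteration snapshot; the new
block was allocated since. The arena layer and the shadow layer of the new ghost are the callee's post. -/
theorem InAt.alloc_ok {u₀ : State} {g : Ghost} {i : Nat} {A6 A6c : Arena} {A : Arena × List Obj} {pc pc' : Word}
    {v s : State} (h : InAt u₀ g i A6 A6c A.1 A pc v) (n : Nat) (hn : n ≤ 1024) (hfit : A.1.Fits n)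
    (hs : Mem.SameExcept
      [⟨(g.e.reg .rsp).toNat - 1888, (g.e.reg .rsp).toNat - 1480⟩, ⟨g.f + 8, g.f + 12⟩, ⟨g.f + 128, g.f + 132⟩,
       shadowSpan (A.1.B + A.1.S + 32) (A.1.B + A.1.S + 32 + n)] v.mem s.mem)
    (harena : ArenaOK (A.1.pushSetup n) (A.1.newSetupObj n :: A.2) s.mem g.f)
    (hshadow : ShadowInv (A.1.newSetupObj n :: A.2) g.frames' g.R s.mem)
    (hrip : s.rip = pc') (hrsp : s.reg .rsp = v.reg .rsp) (hrbp : s.reg .rbp = v.reg .rbp) (hr14 : s.reg .r14 = v.reg .r14)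
    (hrbx : s.reg .rbx = v.reg .rbx) (hcode : CodeOK u₀ s.mem) (hinv : abiInv s) :
    InAt u₀ g i A6 A6c A.1 (A.1.pushSetup n, A.1.newSetupObj n :: A.2) pc' s ∧
      Since A.1 (A.1.pushSetup n) ⟨A.1.B + (A.1.S + 32), n⟩ ∧
      Residue.classifications s.mem (resAt g s.mem i) = Residue.classifications v.mem (resAt g v.mem i) := by
  have hf := h.loop.frame
  obtain ⟨hR, hR8⟩ := hf.r_eq
  obtain ⟨_, hra1, hra2⟩ := hf.ra
  simp only [steady, depth] at hR hra1
  have eRA : g.RA = (g.e.reg .rsp).toNat := rfl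
  have hRlt : g.R + 0x5d0 ≤ 2 ^ 64 := by omega
  have hst := InStep.of_alloc h n hn hs (Or.inl hfit)
  have heres : ObjEq resWins v.mem g.f s.mem g.f := hst.obj.sub (by decide)
  have hemid : ObjEq (Mid.winsAt 6 7) v.mem g.f s.mem g.f := hst.obj.sub (by decide)
  have hR1 := h.loop.res.R1
  have hlt := h.cur.lt
  have hext : A.1.Extends (A.1.pushSetup n) := A.1.extends_pushSetup n
  have hsub : ∀ o, o ∈ A.2 → o ∈ A.1.newSetupObj n :: A.2 := fun o ho => List.mem_cons_of_mem _ ho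
  have hsub' : ∀ o, o ∈ stackObjs g.frames' ++ A.2 → o ∈ stackObjs g.frames' ++ (A.1.newSetupObj n :: A.2) := by
    intro o ho
    rcases List.mem_append.mp ho with h1 | h2
    · exact List.mem_append_left _ h1
    · exact List.mem_append_right _ (hsub o h2)
  have hhand : g.Hand (A.1.pushSetup n, A.1.newSetupObj n :: A.2) := HandOK.mono h.loop.hand hext hsub
  -- `Bits`: the callee wrote `setup_memory_required`, `setup_offset` and shadow bytes only
  have hbits0 : Bits (g.Blk A) g.len s.mem g.f := by
    apply h.bits_frame hs
    intro w hw
    unfold BitsQuiet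
    simp only [List.mem_cons, List.mem_nil_iff, or_false] at hw
    rcases hw with rfl | rfl | rfl | rfl
    · left
      simp only []
      omega
    · right; right; left
      simp only []
      omega
    · right; right; right; left
      simp only []
      omega
    · right; right; right; right
      simp only [shadowSpan]
      omega
  have hbits : Bits (g.Blk (A.1.pushSetup n, A.1.newSetupObj n :: A.2)) g.len s.mem g.f :=
    hbits0.reblk (runBlk_extra List.mem_cons_self) (runBlk_extra (List.mem_cons_of_mem _ List.mem_cons_self))
  -- the environment of a check site for the new ghost
  have henv : Env (g.Blk (A.1.pushSetup n, A.1.newSetupObj n :: A.2))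
      (g.Live (A.1.pushSetup n, A.1.newSetupObj n :: A.2)) s.mem := by
    refine ⟨hshadow.shadow.covers, ?_, ?_⟩
    · apply harena.runBlk_ok
      · exact h.loop.mid.env.ok.sub (fun B hB => runBlk_extra hB)
      · intro C hC
        rcases List.mem_cons.mp hC with rfl | hm
        · exact h.loop.hand.objOut
        · exact h.loop.hand.outside C hm
    · intro B hB
      rcases hB with hsB | hm
      · exact harena.block_live (fun o ho => List.mem_append_right _ ho) hsB
      · have hold := h.loop.mid.env.live B (runBlk_extra hm)
        intro x hx
        exact liveSet_mono hsub' _ (hold x hx)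
  -- the frame
  have hframe : Frame u₀ g pc' (A.1.pushSetup n, A.1.newSetupObj n :: A.2) s := by
    refine ⟨hf.entry, hrip, ?_, ?_, ?_, ?_, ?_, ?_, ?_, ?_, ?_, hcode, hinv, hshadow, ?_, hf.ext.trans hext,
      hf.callers, ?_, hf.same.trans hst.foot⟩
    · rw [hrsp]
      exact hf.rsp
    · rw [hst.low.u64 (g.R + 8) (by omega) (by omega) (by omega)]
      exact hf.shadowIdx
    · rw [hst.saved.u64 (g.R + 0x598) (by omega) (by omega) hRlt]
      exact hf.saved_rbx
    · rw [hst.saved.u64 (g.R + 0x5a0) (by omega) (by omega) hRlt]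
      exact hf.saved_rbp
    · rw [hst.saved.u64 (g.R + 0x5a8) (by omega) (by omega) hRlt]
      exact hf.saved_r12
    · rw [hst.saved.u64 (g.R + 0x5b0) (by omega) (by omega) hRlt]
      exact hf.saved_r13
    · rw [hst.saved.u64 (g.R + 0x5b8) (by omega) (by omega) hRlt]
      exact hf.saved_r14
    · rw [hst.saved.u64 (g.R + 0x5c0) (by omega) (by omega) hRlt]
      exact hf.saved_r15
    · rw [hst.saved.u64 (g.R + 0x5c8) (by omega) (by omega) hRlt]
      exact hf.saved_ra
    · intro o ho
      rcases List.mem_cons.mp ho with rfl | ho'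
      · have ht := h.loop.hand.arenaText
        unfold Arena.newSetupObj Arena.setupObj
        simp only
        omega
      · exact hf.offText o ho'
    · intro k hk
      have e := hf.sh7 k hk
      rw [← e]
      have e2 : (UInt64.ofNat (Vorbis.Globals.log2_4.beg + k)).toNat = 0x120640 + k :=
        toNat_addr (0x120640 + k) (by omega)
      apply hst.log2.readLE
      · rw [e2]
        omega
      · rw [e2]
        omega
      · rw [e2]
        omega
  -- the invariant inside the section, for the new ghost
  have hmid : Mid g 6 6 7 A6 (A.1.pushSetup n, A.1.newSetupObj n :: A.2) s.mem := by
    apply mid_alloc h.loop.mid hemid hst.k6 ?_ ?_ hext henv harena h.loop.mid.noTemps hbits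
    · exact h.loop.mid.consts.frame (hst.low.mono (Nat.le_refl _) (by omega)) (by omega)
    · intro _ _
      exact hst.low.i32 (g.R + 0x28) (by omega) (by omega) (by omega)
  have hcb : (codebooksBlock v.mem g.f).Kept v.mem s.mem :=
    hst.k6 _ ((h.loop.mid.own.cb0 (by omega)).ok (h.loop.mid.own.nonnull (by omega))).F2
  have hres := resTrans_frame h.loop.res heres hst.krec hcb hst.kyoung
  have hcls : Residue.classifications s.mem (resAt g s.mem i) = Residue.classifications v.mem (resAt g v.mem i) := by
    rw [resAt_frame heres]
    simp only [vacc, voff]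
    exact hst.kcur.u8 _ (by simp only []; omega) (by simp only []; omega)
  refine ⟨⟨⟨hframe, hhand, hmid, ?_, ?_, ?_⟩, ?_, ?_, ?_, ?_⟩, h.loop.mid.arena.since_pushSetup n, hcls⟩
  · rw [count_frame heres]
    exact h.loop.i_le
  · exact ⟨hres.ext6, hres.ext6c, hext, hres.n_le, hres.R1, hres.R2, hres.R3, hres.record⟩
  · exact zero_frame h.loop.zero heres hst.kcd
  · rw [hrbp]
    exact h.rbp
  · rw [hr14]
    exact h.r14
  · rw [hrbx, resAt_frame heres]
    exact h.rbx
  · exact resCur_frame h.cur heres (by omega) hst.kcur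

/-! ### The two exits -/

/-- **The exit to R5** (0x115cef): the assertion at the exit's address and R8 — `residue_books` of record `i` is a block of
`16·classifications` bytes allocated since the head-of-iteration snapshot — give `AtR5`. -/
theorem InAt.toR5 {u₀ : State} {g : Ghost} {i : Nat} {A6 A6c Ai : Arena} {A : Arena × List Obj} {v : State}
    (h : InAt u₀ g i A6 A6c Ai A pc_R5 v)
    (hblk : Since Ai A.1 ⟨Residue.residue_books v.mem (resAt g v.mem i),
      16 * Residue.classifications v.mem (resAt g v.mem i)⟩) : AtR5 u₀ g i v :=
  ⟨A6, A6c, Ai, A, h.loop, h.rbp, h.r14, h.rbx,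
    ⟨h.cur.lt, h.cur.R3, h.cur.R4, h.cur.R5, h.cur.R6, h.cur.R7, fun _ => hblk, fun h6 => absurd h6 (by omega),
      fun h7 => absurd h7 (by omega)⟩⟩

/-- **The exit to the epilogue** (0x113b22) with eax = 0: SD.ERR from the section's invariant — H2, H3 from RES(i) and
`classdata = NULL` in the records from `i` on, H5 from the zero rest. -/
theorem InAt.toERR {u₀ : State} {g : Ghost} {i : Nat} {A6 A6c Ai : Arena} {A : Arena × List Obj} {v : State}
    (h : InAt u₀ g i A6 A6c Ai A pc_ERR v) (hrax : (v.reg .rax).toNat % 2 ^ 32 = 0) : AtERR u₀ g v := by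
  have hd : ResidueDeinitOK A.1.Blk v.mem g.f :=
    h.loop.res.upTo.deinit_head h.loop.zero (h.loop.mid.own.nonnull (by omega))
  have h2 : H2 (g.Blk A) v.mem g.f := H2.mono (ResidueDeinitOK.h2 hd h.loop.res.R1.2) (fun _ hB => runBlk_setup hB)
  have h3 : H3 (g.Blk A) v.mem g.f := H3.mono (ResidueDeinitOK.h3 hd) (fun _ hB => runBlk_setup hB)
  have hfail : Failed g.len g.f (g.Live A) A v.mem :=
    h.loop.mid.failed (by omega) h2 h3 (h.loop.mid.h5_null (by omega) _)
  exact ⟨A, h.loop.frame, h.loop.hand, Or.inl ⟨hrax, hfail⟩⟩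

/-! ### The store `r->residue_books = …` (8 bytes at `r + 24`) -/

/-- **The step of the store into `[r + 24, r + 32)`** of the record under construction: the record lies in the block
`residue_config`, allocated since the configuration arena `A6`; the finished records, `classdata` of every record and the first
16 bytes of record `i` are other bytes of that block. -/
theorem InStep.of_store24 {u₀ : State} {g : Ghost} {i : Nat} {A6 A6c Ai : Arena} {A : Arena × List Obj} {pc : Word} {v : State}
    (h : InAt u₀ g i A6 A6c Ai A pc v) (x : Nat) :
    InStep g i A6 A6c Ai v.mem (v.mem.writeLE (addr (resAt g v.mem i + 24)) 8 x) := by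
  have hf := h.loop.frame
  obtain ⟨hR, hR8⟩ := hf.r_eq
  obtain ⟨_, hra1, hra2⟩ := hf.ra
  simp only [steady, depth] at hR hra1
  have hres := h.loop.res
  have h1 := hres.R1
  have hle := hres.n_le
  have hlt := h.cur.lt
  have harena := h.loop.mid.arena
  have hout := h.loop.hand.objOut
  have hobr := h.loop.mid.bits.OBR
  obtain ⟨hB, hr1, hr2⟩ := h.record_in
  have hwr := h.where_r
  have hin : (Block.mk (stb_vorbis.residue_config v.mem g.f)
      (Off.sizeof.Residue * (stb_vorbis.residue_count v.mem g.f).toNat)).contains (resAt g v.mem i + 24) 8 := by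
    simp only [vblock]
    omega
  have hinside := arena_inside harena hB
  simp only [] at hinside
  have hC : Since A6 A.1 ⟨stb_vorbis.residue_config v.mem g.f,
      Off.sizeof.Residue * (stb_vorbis.residue_count v.mem g.f).toNat⟩ := hres.R2.mono (hres.ext6c.trans hres.exti)
  have ea : (addr (resAt g v.mem i + 24)).toNat = resAt g v.mem i + 24 := toNat_addr _ (by omega)
  have hsmall : ∀ B : Block, B.disjoint ⟨resAt g v.mem i + 24, 8⟩ → B.base + B.size ≤ 2 ^ 64 →
      B.Kept v.mem (v.mem.writeLE (addr (resAt g v.mem i + 24)) 8 x) := by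
    intro B hd hBw
    apply Block.Kept.of_writeLE v.mem (resAt g v.mem i + 24) 8 x hd
    · simp only [vblock]
      omega
    · simp only []
      omega
    · exact hBw
  refine ⟨?_, ?_, ?_, ?_, ?_, ?_, ?_, ?_, ?_, ?_⟩
  · exact harena.objEq_of_store_blk hB x hin hout (by simp only [voff] at hobr ⊢; omega) (by decide)
  · intro B hB6
    exact harena.kept_of_store_since h.loop.mid.extc hB6 hC x hin
  · intro B hBy
    have hne : B ≠ ⟨stb_vorbis.residue_config v.mem g.f,
        Off.sizeof.Residue * (stb_vorbis.residue_count v.mem g.f).toNat⟩ := (Since.ne_old hres.R2.1 hBy).symm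
    exact harena.blkOK.kept_store (hBy.1.mono hres.exti) hB hne v.mem x hin
  · intro i' hi'
    apply hsmall
    · simp only [resAt, vblock, vacc, voff]
      omega
    · simp only [resAt, vacc, voff] at hwr ⊢
      omega
  · intro i' hi'
    apply hsmall
    · simp only [resAt, vblock, vacc, voff]
      omega
    · simp only [resAt, vacc, voff] at hwr hinside h1 hi' ⊢
      omega
  · apply hsmall
    · simp only [vblock]
      omega
    · simp only []
      omega
  · apply Mem.EqOn.writeLE
    · rw [ea]
      omega
    · rw [ea]
      omega
  · apply Mem.EqOn.writeLE
    · rw [ea]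
      omega
    · rw [ea]
      omega
  · apply Mem.EqOn.writeLE
    · rw [ea]
      omega
    · rw [ea]
      have hm : (⟨0x120640, 16⟩ : Block) ∈ fixedBlocks g.len := by
        simp only [fixedBlocks, globalBlocks, List.mem_cons, true_or, or_true]
      have ho := h.loop.hand.outside ⟨0x120640, 16⟩ hm
      simp only [] at ho
      omega
  · apply Mem.SameExcept.writeLE
    · rw [ea]
      omega
    · refine ⟨⟨g.A0.1.B, g.A0.1.B + g.A0.1.L⟩, ?_, ?_⟩
      · exact List.mem_cons_of_mem _ (List.mem_cons_of_mem _ (List.mem_cons_of_mem _ List.mem_cons_self))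
      · rw [ea, ← hf.ext.B, ← hf.ext.L]
        simp only []
        omega

/-- **After the checked store `r->residue_books = x`** (0x115bae; the check's return address was pushed first: `m1`): the
assertion is kept (stage 4: the first 16 bytes of the record), the field holds `x`, `classifications` reads the same. -/
theorem InAt.store24 {u₀ : State} {g : Ghost} {i : Nat} {A6 A6c Ai : Arena} {A : Arena × List Obj} {pc pc' : Word}
    {v s : State} (h : InAt u₀ g i A6 A6c Ai A pc v) (m1 : Mem)
    (hs1 : Mem.SameExcept
      [⟨(g.e.reg .rsp).toNat - 1888, (g.e.reg .rsp).toNat - 1480⟩,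
       ⟨(g.e.reg .rsp).toNat - 1288, (g.e.reg .rsp).toNat - 1224⟩] v.mem m1)
    (x : Nat) (hx : x < 2 ^ 64) (hmem : s.mem = m1.writeLE (addr (resAt g v.mem i + 24)) 8 x)
    (hrip : s.rip = pc') (hrsp : s.reg .rsp = v.reg .rsp) (hrbp : s.reg .rbp = v.reg .rbp) (hr14 : s.reg .r14 = v.reg .r14)
    (hrbx : s.reg .rbx = v.reg .rbx) (hinv : abiInv s) :
    InAt u₀ g i A6 A6c Ai A pc' s ∧ Residue.residue_books s.mem (resAt g s.mem i) = x ∧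
      Residue.classifications s.mem (resAt g s.mem i) = Residue.classifications v.mem (resAt g v.mem i) := by
  have hf := h.loop.frame
  obtain ⟨hR, hR8⟩ := hf.r_eq
  obtain ⟨_, hra1, hra2⟩ := hf.ra
  simp only [steady, depth] at hR hra1
  have eRA : g.RA = (g.e.reg .rsp).toNat := rfl
  -- the state after the push
  have hcode1 : CodeOK u₀ m1 := by
    apply Mem.EqOn.step_same hf.code hs1
    intro w hw
    simp only [List.mem_cons, List.mem_nil_iff, or_false] at hw
    have e1 : L.textHi = 0x119d40 := rfl
    rcases hw with rfl | rfl <;> simp only [] <;> omega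
  have hq : ∀ w, w ∈ [(⟨(g.e.reg .rsp).toNat - 1888, (g.e.reg .rsp).toNat - 1480⟩ : Span),
       ⟨(g.e.reg .rsp).toNat - 1288, (g.e.reg .rsp).toNat - 1224⟩] → Quiet g w := by
    intro w hw
    unfold Quiet
    simp only [List.mem_cons, List.mem_nil_iff, or_false] at hw
    rcases hw with rfl | rfl <;> simp only [] <;> omega
  have he1 : ObjEq resWins v.mem g.f m1 g.f := (InStep.of_quiet h hs1 hq).obj.sub (by decide)
  have hk1 := (InStep.of_quiet h hs1 hq).kcur
  have h1 : InAt u₀ g i A6 A6c Ai A pc { v with mem := m1 } :=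
    h.after_stack (s := { v with mem := m1 }) hs1 hf.rip rfl rfl rfl rfl hcode1 hf.inv
  have er1 : resAt g m1 i = resAt g v.mem i := resAt_frame he1 i
  -- the store
  have hst := InStep.of_store24 h1 x
  have hmem' : s.mem = ({ v with mem := m1 } : State).mem.writeLE
      (addr (resAt g ({ v with mem := m1 } : State).mem i + 24)) 8 x := by
    show s.mem = m1.writeLE (addr (resAt g m1 i + 24)) 8 x
    rw [er1]
    exact hmem
  rw [← hmem'] at hst
  have hwr := h1.where_r
  have hwr' : 0x119d40 ≤ resAt g m1 i ∧ resAt g m1 i + 32 ≤ 0xC00000 ∧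
      (resAt g m1 i + 32 ≤ 0x700000 ∨ 0x800000 ≤ resAt g m1 i) := hwr
  rw [er1] at hwr'
  have ea : (addr (resAt g v.mem i + 24)).toNat = resAt g v.mem i + 24 := toNat_addr _ (by omega)
  obtain ⟨hB, hr1, hr2⟩ := h1.record_in
  have harena1 := h1.loop.mid.arena
  have hinside := arena_inside harena1 hB
  have hout := h.loop.hand.objOut
  have hobr := h.loop.mid.bits.OBR
  simp only [Off.sizeof.stb_vorbis] at hout hobr
  have hr1' : stb_vorbis.residue_config m1 g.f ≤ resAt g m1 i := hr1
  have hr2' : resAt g m1 i + 32 ≤ stb_vorbis.residue_config m1 g.f +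
      Off.sizeof.Residue * (stb_vorbis.residue_count m1 g.f).toNat := hr2
  rw [er1] at hr1' hr2'
  simp only [] at hinside
  have hinside' : A.1.B ≤ stb_vorbis.residue_config m1 g.f ∧ stb_vorbis.residue_config m1 g.f +
      Off.sizeof.Residue * (stb_vorbis.residue_count m1 g.f).toNat ≤ A.1.B + A.1.L := hinside
  have hun : ShadowUntouched ({ v with mem := m1 } : State).mem s.mem := by
    show Mem.EqOn 0xC00000 0xE00000 m1 s.mem
    rw [hmem]
    apply Mem.EqOn.writeLE
    · rw [ea]
      omega
    · rw [ea]
      omega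
  have harena : ArenaOK A.1 A.2 s.mem g.f := by
    apply harena1.frame
    · simp only [Off.sizeof.stb_vorbis]
      omega
    · show Mem.EqOn _ _ m1 s.mem
      rw [hmem]
      simp only [voff]
      apply Mem.EqOn.writeLE
      · rw [ea]
        omega
      · rw [ea]
        omega
  have hbits : Bits (g.Blk A) g.len s.mem g.f := by
    apply h1.loop.mid.bits.frame_fields
    have hsf : ∀ lo hi : Nat, g.f ≤ lo → hi ≤ g.f + 1808 → Mem.EqOn lo hi m1 s.mem := by
      intro lo hi h1' h2'
      rw [hmem]
      apply Mem.EqOn.writeLE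
      · rw [ea]
        omega
      · rw [ea]
        omega
    exact ⟨hsf _ _ (by omega) (by omega), hsf _ _ (by omega) (by omega), hsf _ _ (by omega) (by omega),
      hsf _ _ (by omega) (by omega)⟩
  have hcode : CodeOK u₀ s.mem := by
    show Mem.EqOn L.textLo L.textHi u₀.mem s.mem
    rw [hmem]
    apply Mem.EqOn.trans hcode1
    have e1 : L.textHi = 0x119d40 := rfl
    apply Mem.EqOn.writeLE
    · rw [ea]
      omega
    · rw [ea]
      omega
  have hat : InAt u₀ g i A6 A6c Ai A pc' s :=
    h1.step hst hun harena hbits hrip hrsp hrbp hr14 hrbx hcode hinv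
  have heres : ObjEq resWins m1 g.f s.mem g.f := hst.obj.sub (by decide)
  have er2 : resAt g s.mem i = resAt g v.mem i := by
    rw [resAt_frame heres i]
    exact er1
  refine ⟨hat, ?_, ?_⟩
  · rw [er2, hmem]
    simp only [vacc, voff]
    unfold Mem.u64
    rw [Mem.readLE_writeLE_same _ _ _ _ (by decide)]
    exact Nat.mod_eq_of_lt hx
  · rw [er2]
    have e4 : Residue.classifications s.mem (resAt g v.mem i) = Residue.classifications m1 (resAt g v.mem i) := by
      simp only [vacc, voff]
      have hk := hst.kcur
      have hk' : (Block.mk (resAt g m1 i) 16).Kept m1 s.mem := hk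
      rw [er1] at hk'
      exact hk'.u8 _ (by simp only []; omega) (by simp only []; omega)
    have e5 : Residue.classifications m1 (resAt g v.mem i) = Residue.classifications v.mem (resAt g v.mem i) := by
      simp only [vacc, voff]
      exact hk1.u8 _ (by simp only []; omega) (by simp only []; omega)
    rw [e4, e5]

/-! ### Bit-level facts of the walk -/

/-- The two sides of `cmp edx, r13d` (0x115b8e) as numbers: `r13d = j`, `edx = classifications` (a byte). -/
theorem cmp_vals (j c : Nat) (hj : j ≤ 64) (hc : c ≤ 64) :
    (Word.part .w32 (addr j)).toInt = (j : Int) ∧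
      (BitVec.zeroExtend 32 (BitVec.setWidth 8 (BitVec.zeroExtend 32 (BitVec.ofNat 8 c)))).toInt = (c : Int) := by
  have e1 : (Word.part .w32 (addr j)).toNat = j := by
    rw [Vorbis.toNat_part32, toNat_addr j (by omega)]
    omega
  have e2 : (BitVec.zeroExtend 32 (BitVec.setWidth 8 (BitVec.zeroExtend 32 (BitVec.ofNat 8 c)))).toNat = c := by
    simp only [BitVec.truncate_eq_setWidth, BitVec.toNat_setWidth, BitVec.toNat_ofNat]
    omega
  constructor
  · rw [toInt_of_lt _ (by omega), e1]
  · rw [toInt_of_lt _ (by omega), e2]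

/-- A read off the stack is not changed by a push (the return address of a `call`). -/
theorem read_push (m : Mem) (sp : Word) (x : Nat) (b : Word) (k : Nat) (hsp : 0x700000 ≤ sp.toNat ∧ sp.toNat + 8 ≤ 0x800000)
    (hb : b.toNat + k ≤ 0x700000 ∨ (0x800000 ≤ b.toNat ∧ b.toNat + k ≤ 0xC00000)) :
    (m.writeLE sp 8 x).readLE b k = m.readLE b k := by
  apply Mem.readLE_writeLE_disjoint_noWrap
  · unfold Mem.NoWrap
    omega
  · unfold Mem.NoWrap
    omega
  · omega

/-- `shl eax, 4` (0x115b95): the request `16·classifications` as a number. -/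
theorem shl4_val (c : Nat) (hc : c ≤ 64) :
    (Word.ofBV ((BitVec.zeroExtend 32 (BitVec.setWidth 8 (BitVec.zeroExtend 32 (BitVec.ofNat 8 c)))) <<< 4)).toNat % 2 ^ 32 =
      16 * c := by
  rw [Vorbis.toNat_ofBV32]
  simp only [BitVec.truncate_eq_setWidth, BitVec.toNat_shiftLeft, BitVec.toNat_setWidth, BitVec.toNat_ofNat,
    Nat.shiftLeft_eq]
  omega

/-- **The check site of `residue_cascade[j]`** (0x115b6d, store1): the frame object `residue_cascade` (64 bytes at `[R + C0H]`) of
start_decoder's own protected frame. -/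
theorem InAt.check_cascade {u₀ : State} {g : Ghost} {i : Nat} {A6 A6c Ai : Arena} {A : Arena × List Obj} {pc : Word} {v : State}
    (h : InAt u₀ g i A6 A6c Ai A pc v) {mem' : Mem} (hun : ShadowUntouched v.mem mem') (b : Word) (j : Nat) (hj : j < 64)
    (hb : b.toNat = g.R + 0xc0 + j) : AccSmall 1 mem' b := by
  have ho : (⟨g.base + 112, 64, .stack⟩ : Obj) ∈ stackObjs g.frames' ++ A.2 := by
    apply List.mem_append_left
    unfold Ghost.frames'
    rw [stackObjs_cons]
    apply List.mem_append_left
    unfold FrameLayout.objsAt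
    refine List.mem_map.mpr ⟨⟨"residue_cascade", 112, 64⟩, ?_, rfl⟩
    simp only [Vorbis.Frames.start_decoder, List.mem_cons, true_or, or_true]
  apply Vorbis.check_small h.loop.frame.shadow hun ho (by decide)
  · show g.base + 112 ≤ b.toNat
    unfold Ghost.base
    omega
  · show b.toNat + 1 ≤ g.base + 112 + 64
    unfold Ghost.base
    omega

/-- `movsxd r15, r13d` (0x115b62) with `r13d = j < 64`: the number itself. -/
theorem sext_j (j : Nat) (hj : j < 64) : Word.ofBV (BitVec.signExtend 64 (Word.part .w32 (addr j))) = addr j := by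
  have e1 : (Word.part .w32 (addr j)).toNat = j := by
    rw [Vorbis.toNat_part32, toNat_addr j (by omega)]
    omega
  apply eq_addr
  rw [toNat_sext32 _ (by omega), e1]

/-- `add r13d, 1` (0x115b7a) with `r13d = j < 64`. -/
theorem inc_j (j : Nat) (hj : j < 64) : Word.ofBV (Word.part .w32 (addr j) + 1#32) = addr (j + 1) := by
  have e1 : (Word.part .w32 (addr j)).toNat = j := by
    rw [Vorbis.toNat_part32, toNat_addr j (by omega)]
    omega
  apply eq_addr
  rw [Vorbis.toNat_ofBV32, BitVec.toNat_add, e1]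
  show (j + 1) % 2 ^ 32 = j + 1
  omega

/-- **After `error(f, e)` returned**: its footprint is the stack below the steady stack pointer and `f->error`. -/
theorem InAt.after_error {u₀ : State} {g : Ghost} {i : Nat} {A6 A6c Ai : Arena} {A : Arena × List Obj} {pc pc' : Word}
    {v s : State} (h : InAt u₀ g i A6 A6c Ai A pc v)
    (hsame : Mem.SameExcept
      [⟨(g.e.reg .rsp).toNat - 1888, (g.e.reg .rsp).toNat - 1480⟩, ⟨g.f + 140, g.f + 144⟩] v.mem s.mem)
    (hrip : s.rip = pc') (hrsp : s.reg .rsp = v.reg .rsp) (hrbp : s.reg .rbp = v.reg .rbp) (hr14 : s.reg .r14 = v.reg .r14)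
    (hrbx : s.reg .rbx = v.reg .rbx) (hcode : CodeOK u₀ s.mem) (hinv : abiInv s) : InAt u₀ g i A6 A6c Ai A pc' s := by
  have hf := h.loop.frame
  obtain ⟨hR, hR8⟩ := hf.r_eq
  simp only [steady] at hR
  have eRA : g.RA = (g.e.reg .rsp).toNat := rfl
  have hq : ∀ w, w ∈ [(⟨(g.e.reg .rsp).toNat - 1888, (g.e.reg .rsp).toNat - 1480⟩ : Span),
       ⟨g.f + 140, g.f + 144⟩] → Quiet g w := by
    intro w hw
    unfold Quiet
    simp only [List.mem_cons, List.mem_nil_iff, or_false] at hw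
    rcases hw with rfl | rfl <;> simp only [] <;> omega
  have hq' : ∀ w, w ∈ [(⟨(g.e.reg .rsp).toNat - 1888, (g.e.reg .rsp).toNat - 1480⟩ : Span),
       ⟨g.f + 140, g.f + 144⟩] → BitsQuiet g w := by
    intro w hw
    unfold BitsQuiet
    simp only [List.mem_cons, List.mem_nil_iff, or_false] at hw
    rcases hw with rfl | rfl <;> simp only [] <;> omega
  exact h.step (InStep.of_quiet h hsame hq) (quiet_untouched h hsame hq) (h.arena_frame hsame hq) (h.bits_frame hsame hq')
    hrip hrsp hrbp hr14 hrbx hcode hinv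

end Vorbis.Spec.start_decoder_R4
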